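-- pv_equiv track=rewrite | github.com/cldowdy/code-for-tampa-bay | program/assignment2add_charges.py | substring_rstrip
-- ===== SOURCE A (Python) =====
-- def substring_rstrip(aline):
--         """Occasionally, there are strings located within out strings. It is desireable that all of these have
--         no trailing whitespace. This function removes trailing whitespace by keeping track of the quote level,
--         and creating a new string from the old one by looking through each element. If the element its on is a
--         space, and the next one it a double quote, and its in the first quote level, it'll pass over that element
--
--         Arguments
--         --------
--         aline -- a string containing a substring (or not)
--         """
--         list_line = list(aline)
--         level = 0
--         new_line = []
--         for i, c in enumerate(list_line):
--                 try:
--                         next_c = list_line[i+1]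
--                         if c == '"' and level == 0:
--                                 level += 1
--                         elif c == '"' and level >= 1:
--                                 level -= 1
--
--                         if level == 1 and c == " ":
--                                 if next_c == '"':
--                                         pass
--                                 else:
--                                         new_line.append(c)
--                         else:
--                                 new_line.append(c)
--                 except IndexError:
--                         new_line.append(c)
--
--         return "".join(new_line)
-- ===== SOURCE B (Python) =====
-- def substring_rstrip(aline):
--     """Split on double quotes: pieces at odd positions are quoted interiors.
--     For each interior that has a closing quote, drop one trailing space, then rejoin."""
--     parts = aline.split('"')
--     out = [parts[0]]
--     i = 1
--     while i < len(parts):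
--         p = parts[i]
--         if i + 1 < len(parts):  # this piece is closed by a quote
--             if p.endswith(' '):
--                 p = p[:-1]
--             out.append(p)
--             out.append(parts[i + 1])
--             i += 2
--         else:
--             out.append(p)
--             i += 1
--     return '"'.join(out)
-- ===== Notes on version B (the rewrite author's own statement) =====
-- stated objective: simpler
-- what changed: Replaces A's per-character quote-level state machine with lookahead by splitting on the double-quote character, dropping one trailing space from each quoted interior piece that has a closing quote, then rejoining.
import Mathlib
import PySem

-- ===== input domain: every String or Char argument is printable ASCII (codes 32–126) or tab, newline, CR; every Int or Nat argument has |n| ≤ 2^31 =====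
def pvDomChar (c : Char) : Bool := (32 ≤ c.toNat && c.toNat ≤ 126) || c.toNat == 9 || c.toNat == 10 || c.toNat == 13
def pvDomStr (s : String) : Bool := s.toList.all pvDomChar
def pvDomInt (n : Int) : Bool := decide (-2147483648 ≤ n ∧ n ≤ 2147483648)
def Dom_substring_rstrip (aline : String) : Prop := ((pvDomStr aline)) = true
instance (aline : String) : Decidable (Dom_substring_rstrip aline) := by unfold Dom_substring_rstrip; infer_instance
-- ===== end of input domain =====

-- B replaces A's per-character quote-level state machine by split-on-'"' / fix the closed interior pieces / rejoin (objective: simpler).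

-- ===== PORT A =====
-- loop body of A: try next_c = list_line[i+1] (none = IndexError), update level, append or skip
def pvStepA (list_line : List Char) (s : Int × List Char) (ic : Int × Char) : Int × List Char :=
  match PySem.List.pyGet? list_line (ic.1 + 1) with
  | none => (s.1, s.2 ++ [ic.2])     -- except IndexError: new_line.append(c)
  | some next_c =>
    let level := if ic.2 = '"' ∧ s.1 = 0 then s.1 + 1
                 else if ic.2 = '"' ∧ 1 ≤ s.1 then s.1 - 1
                 else s.1
    if level = 1 ∧ ic.2 = ' ' then
      if next_c = '"' then (level, s.2)
      else (level, s.2 ++ [ic.2])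
    else (level, s.2 ++ [ic.2])

-- literal port of A: fold over enumerate(list(aline)) with state (level, new_line)
def substring_rstrip (aline : String) : String :=
  let list_line := aline.toList
  let st := (PySem.List.enumerate list_line 0).foldl (pvStepA list_line) (0, [])
  -- "".join(new_line) over a list of single characters
  String.ofList (PySem.Chars.join [] (st.2.map (fun c => [c])))

-- ===== PORT B =====
-- the while loop of Source B: consume (interior, following) piece pairs; a lone last piece is unchanged
def pvFixTail : List (List Char) → List (List Char)
  | [] => []
  | [p] => [p]
  | p :: q :: rest =>
      (if PySem.Chars.endswith p [' '] then PySem.Chars.slice p none (some (-1)) else p)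
        :: q :: pvFixTail rest

def substring_rstrip_alt (aline : String) : String :=
  let parts := PySem.Chars.splitOn aline.toList ['"']
  match parts with
  | [] => ""          -- unreachable: str.split never returns an empty list (totality guard)
  | p0 :: rest => String.ofList (PySem.Chars.join ['"'] (p0 :: pvFixTail rest))

-- ===== PRECONDITION & SPEC =====
def Spec_substring_rstrip (aline : String) (out : String) : Prop := out = substring_rstrip_alt aline
instance (aline : String) (out : String) : Decidable (Spec_substring_rstrip aline out) := by unfold Spec_substring_rstrip; infer_instance

-- ===== CLAIM (what is proved, stated in full; the proofs are below) =====
def Claim_equal_substring_rstrip : Prop := ∀ (aline : String), Dom_substring_rstrip aline → Spec_substring_rstrip aline (substring_rstrip aline)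

-- ===== LEMMAS AND PROOFS =====

-- A's loop as structural recursion on the remaining characters (level, output)
def pvProc : Int → List Char → Int × List Char
  | lv, [] => (lv, [])
  | lv, [c] => (lv, [c])
  | lv, c :: d :: rest =>
      let lv' := if c = '"' ∧ lv = 0 then lv + 1
                 else if c = '"' ∧ 1 ≤ lv then lv - 1
                 else lv
      let r := pvProc lv' (d :: rest)
      (r.1, (if lv' = 1 ∧ c = ' ' ∧ d = '"' then ([] : List Char) else [c]) ++ r.2)

-- the common behaviour, split by quote level (outside / inside a quoted substring)
mutual
def pvOut : List Char → List Char
  | [] => []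
  | c :: rest => if c = '"' then '"' :: pvIn rest else c :: pvOut rest
def pvIn : List Char → List Char
  | [] => []
  | c :: rest =>
      if c = '"' then '"' :: pvOut rest
      else if c = ' ' ∧ rest.head? = some '"' then pvIn rest
      else c :: pvIn rest
end

-- accumulator-style model of s.split('"')
def pvSplit (pre : List Char) : List Char → List (List Char)
  | [] => [pre]
  | c :: rest => if c = '"' then pre :: pvSplit [] rest else pvSplit (pre ++ [c]) rest

def pvFix (p : List Char) : List Char := if p.getLast? = some ' ' then p.dropLast else p

-- the value B builds from the split pieces
def pvB (parts : List (List Char)) : List Char :=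
  match parts with
  | [] => []
  | p0 :: ps => PySem.Chars.join ['"'] (p0 :: pvFixTail ps)

lemma pvSplit_ne_nil (cs : List Char) : ∀ pre, pvSplit pre cs ≠ [] := by
  induction cs with
  | nil => intro pre; simp [pvSplit]
  | cons c rest ih => intro pre; simp only [pvSplit]; split <;> simp [ih]

lemma go_spec (fuel : Nat) : ∀ (l cur : List Char) (accs : List (List Char)),
    l.length ≤ fuel →
    PySem.Chars.splitOn.go ['"'] fuel l cur accs = accs.reverse ++ pvSplit cur.reverse l := by
  induction fuel with
  | zero =>
    intro l cur accs h
    have : l = [] := by simpa using h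
    subst this
    simp [PySem.Chars.splitOn.go, pvSplit]
  | succ n ih =>
    intro l cur accs h
    cases l with
    | nil => simp [PySem.Chars.splitOn.go, pvSplit]
    | cons c rest =>
      by_cases hc : c = '"'
      · subst hc
        have hpre : List.isPrefixOf ['"'] ('"' :: rest) = true := by simp [List.isPrefixOf]
        simp only [PySem.Chars.splitOn.go, hpre, if_pos]
        rw [ih _ _ _ (by simpa using Nat.le_of_succ_le_succ h)]
        simp [pvSplit]
      · have hpre : List.isPrefixOf ['"'] (c :: rest) = false := by
          simp [List.isPrefixOf]
          exact fun e => hc e.symm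
        simp only [PySem.Chars.splitOn.go, hpre]
        rw [if_neg (by simp)]
        rw [ih _ _ _ (by simpa using Nat.le_of_succ_le_succ h)]
        simp [pvSplit, hc]

lemma splitOn_eq (cs : List Char) : PySem.Chars.splitOn cs ['"'] = pvSplit [] cs := by
  unfold PySem.Chars.splitOn
  rw [go_spec _ _ _ _ (by omega)]
  simp

-- the fold of A's loop computes pvProc (lookahead list_line[i+1] = head of the remaining suffix)
lemma foldA (pre suf : List Char) (lv : Int) (acc : List Char) :
    (PySem.List.enumerate suf (pre.length : Int)).foldl (pvStepA (pre ++ suf)) (lv, acc)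
      = ((pvProc lv suf).1, acc ++ (pvProc lv suf).2) := by
  induction suf generalizing pre lv acc with
  | nil => simp [PySem.List.enumerate_nil, pvProc]
  | cons c rest ih =>
    rw [PySem.List.enumerate_cons, List.foldl_cons]
    cases rest with
    | nil =>
      have hget : PySem.List.pyGet? (pre ++ [c]) ((pre.length : Int) + 1) = none := by
        rw [show ((pre.length : Int) + 1) = (((pre ++ [c]).length : Nat) : Int) by simp]
        rw [PySem.List.pyGet?_natCast]
        simp
      simp [pvStepA, hget, PySem.List.enumerate_nil, pvProc]
    | cons d rest' =>
      have hget : PySem.List.pyGet? (pre ++ c :: d :: rest') ((pre.length : Int) + 1) = some d := by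
        rw [show pre ++ c :: d :: rest' = (pre ++ [c]) ++ d :: rest' by simp]
        rw [show ((pre.length : Int) + 1) = (((pre ++ [c]).length : Nat) : Int) by simp]
        rw [PySem.List.pyGet?_natCast]
        simp
      have hen : PySem.List.enumerate (d :: rest') ((pre.length : Int) + 1)
          = PySem.List.enumerate (d :: rest') (((pre ++ [c]).length : Nat) : Int) := by
        simp
      have hfull : pre ++ c :: d :: rest' = (pre ++ [c]) ++ d :: rest' := by simp
      simp only [pvStepA, hget]
      by_cases hc : c = '"'
      · subst hc
        have hcond : ¬ ((if ('"' : Char) = '"' ∧ lv = 0 then lv + 1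
            else if ('"' : Char) = '"' ∧ 1 ≤ lv then lv - 1 else lv) = 1 ∧ ('"' : Char) = ' ') :=
          fun h => absurd h.2 (by decide)
        rw [if_neg hcond, hen]
        conv_lhs => rw [hfull]
        rw [ih]
        simp only [pvProc]
        simp
      · have hlv' : (if c = '"' ∧ lv = 0 then lv + 1
            else if c = '"' ∧ 1 ≤ lv then lv - 1 else lv) = lv := by
          simp [hc]
        rw [hlv']
        by_cases h1 : lv = 1 ∧ c = ' '
        · by_cases h2 : d = '"'
          · rw [if_pos h1, if_pos h2, hen]
            conv_lhs => rw [hfull]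
            rw [ih]
            simp only [pvProc]
            rw [hlv', if_pos ⟨h1.1, h1.2, h2⟩]
            simp
          · rw [if_pos h1, if_neg h2, hen]
            conv_lhs => rw [hfull]
            rw [ih]
            simp only [pvProc]
            rw [hlv', if_neg (fun h => h2 h.2.2)]
            simp
        · rw [if_neg h1, hen]
          conv_lhs => rw [hfull]
          rw [ih]
          simp only [pvProc]
          rw [hlv', if_neg (fun h => h1 ⟨h.1, h.2.1⟩)]
          simp

lemma pvProc_out (cs : List Char) : (pvProc 0 cs).2 = pvOut cs ∧ (pvProc 1 cs).2 = pvIn cs := by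
  induction cs with
  | nil => simp [pvProc, pvOut, pvIn]
  | cons c rest ih =>
    cases rest with
    | nil =>
      constructor <;> by_cases hc : c = '"' <;> simp [pvProc, pvOut, pvIn, hc]
    | cons d rest' =>
      obtain ⟨ih0, ih1⟩ := ih
      constructor
      · by_cases hc : c = '"'
        · simp [pvProc, pvOut, hc, ih1]
        · simp [pvProc, pvOut, hc, ih0]
      · by_cases hc : c = '"'
        · simp [pvProc, pvIn, hc, ih0]
        · by_cases hs : c = ' ' ∧ d = '"'
          · obtain ⟨hs1, hs2⟩ := hs
            subst hs1; subst hs2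
            rw [pvIn] at ih1
            simp only [if_pos] at ih1
            simp [pvProc, pvIn, ih1]
          · simp only [not_and_or] at hs
            rcases hs with hs | hs <;>
              simp [pvProc, pvIn, hc, hs, ih1]

lemma pvIn_free (pre : List Char) (h : '"' ∉ pre) : pvIn pre = pre := by
  induction pre with
  | nil => rfl
  | cons a rest ih =>
    have ha : a ≠ '"' := fun e => h (by simp [e])
    have hr : '"' ∉ rest := fun e => h (by simp [e])
    rw [pvIn, if_neg ha, if_neg, ih hr]
    rintro ⟨-, h2⟩
    exact hr (List.mem_of_mem_head? (by simp [h2]))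

lemma pvOut_append_free (pre xs : List Char) (h : '"' ∉ pre) :
    pvOut (pre ++ xs) = pre ++ pvOut xs := by
  induction pre with
  | nil => rfl
  | cons a rest ih =>
    have ha : a ≠ '"' := fun e => h (by simp [e])
    have hr : '"' ∉ rest := fun e => h (by simp [e])
    rw [List.cons_append, pvOut, if_neg ha, ih hr]
    simp

lemma pvFix_cons (a b : Char) (l : List Char) : pvFix (a :: b :: l) = a :: pvFix (b :: l) := by
  simp only [pvFix, List.getLast?_cons_cons]
  split <;> simp [List.dropLast]

lemma pvIn_append_quote (pre rest : List Char) (h : '"' ∉ pre) :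
    pvIn (pre ++ '"' :: rest) = pvFix pre ++ '"' :: pvOut rest := by
  induction pre with
  | nil => simp [pvIn, pvFix]
  | cons a pre' ih =>
    have ha : a ≠ '"' := fun e => h (by simp [e])
    have hr : '"' ∉ pre' := fun e => h (by simp [e])
    rw [List.cons_append, pvIn, if_neg ha]
    cases pre' with
    | nil =>
      by_cases hs : a = ' '
      · subst hs
        rw [if_pos (by simp)]
        simp [pvIn, pvFix]
      · rw [if_neg (by simp [hs])]
        simp [pvIn, pvFix, hs]
    | cons b pre'' =>
      have hb : b ≠ '"' := fun e => hr (by simp [e])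
      rw [if_neg (by simp [hb]), ih hr, pvFix_cons]
      simp

lemma fix_eq (p : List Char) :
    (if PySem.Chars.endswith p [' '] then PySem.Chars.slice p none (some (-1)) else p) = pvFix p := by
  by_cases hs : p.getLast? = some ' '
  · obtain ⟨l', rfl⟩ := List.getLast?_eq_some_iff.mp hs
    rw [if_pos (by rw [PySem.Chars.endswith_iff]; exact ⟨l', rfl⟩)]
    rw [pvFix, if_pos hs]
    simp [PySem.Chars.slice_eq_listSlice, PySem.List.slice_to_neg_one]
  · rw [pvFix, if_neg hs, if_neg]
    intro hew
    obtain ⟨l', rfl⟩ := (PySem.Chars.endswith_iff p [' ']).mp hew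
    simp at hs

lemma join_cons_ne_nil (p : List Char) (L : List (List Char)) (h : L ≠ []) :
    PySem.Chars.join ['"'] (p :: L) = p ++ '"' :: PySem.Chars.join ['"'] L := by
  cases L with
  | nil => exact absurd rfl h
  | cons q l => rw [PySem.Chars.join_cons_cons]; simp

lemma pvFixTail_ne_nil (L : List (List Char)) (h : L ≠ []) : pvFixTail L ≠ [] := by
  cases L with
  | nil => exact absurd rfl h
  | cons p l => cases l <;> simp [pvFixTail]

lemma pvMain (cs : List Char) : ∀ pre, '"' ∉ pre →
    (pvB (pvSplit pre cs) = pvOut (pre ++ cs) ∧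
     PySem.Chars.join ['"'] (pvFixTail (pvSplit pre cs)) = pvIn (pre ++ cs)) := by
  induction cs with
  | nil =>
    intro pre h
    constructor
    · simp only [pvSplit, pvB, pvFixTail, PySem.Chars.join_singleton]
      have h0 := pvOut_append_free pre [] h
      simp only [List.append_nil, pvOut] at h0
      rw [List.append_nil]
      exact h0.symm
    · simp only [pvSplit, pvFixTail, PySem.Chars.join_singleton]
      simpa using (pvIn_free pre h).symm
  | cons c rest ih =>
    intro pre h
    by_cases hc : c = '"'
    · subst hc
      obtain ⟨h2, t2, h2t⟩ : ∃ h2 t2, pvSplit [] rest = h2 :: t2 := by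
        cases hsp : pvSplit [] rest with
        | nil => exact absurd hsp (pvSplit_ne_nil _ _)
        | cons a l => exact ⟨a, l, rfl⟩
      have ihO := (ih [] (by simp)).1
      have ihI := (ih [] (by simp)).2
      constructor
      · rw [pvSplit, if_pos rfl, pvB,
          join_cons_ne_nil _ _ (pvFixTail_ne_nil _ (pvSplit_ne_nil _ _)), ihI,
          pvOut_append_free _ _ h, pvOut, if_pos rfl]
        simp
      · rw [pvSplit, if_pos rfl, h2t, pvFixTail,
          join_cons_ne_nil _ _ (List.cons_ne_nil _ _),
          fix_eq, pvIn_append_quote _ _ h]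
        have : PySem.Chars.join ['"'] (h2 :: pvFixTail t2) = pvB (pvSplit [] rest) := by
          rw [h2t, pvB]
        rw [this, ihO]
        simp
    · have hpre : '"' ∉ pre ++ [c] := by
        intro hm
        rcases List.mem_append.mp hm with hm | hm
        · exact h hm
        · exact hc (List.mem_singleton.mp hm).symm
      have heq : pre ++ c :: rest = (pre ++ [c]) ++ rest := by simp
      rw [pvSplit, if_neg hc, heq]
      exact ih (pre ++ [c]) hpre

-- ===== VERDICT (by name: the statement is the Claim_ definition above) =====
theorem substring_rstrip_spec : Claim_equal_substring_rstrip := by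
  intro aline _
  show substring_rstrip aline = substring_rstrip_alt aline
  simp only [substring_rstrip, substring_rstrip_alt]
  have hA := foldA [] aline.toList 0 []
  simp only [List.nil_append, List.length_nil, Nat.cast_zero, List.nil_append] at hA
  rw [hA]
  rw [splitOn_eq]
  obtain ⟨p0, ps, hps⟩ : ∃ p0 ps, pvSplit [] aline.toList = p0 :: ps := by
    cases h : pvSplit [] aline.toList with
    | nil => exact absurd h (pvSplit_ne_nil _ _)
    | cons a l => exact ⟨a, l, rfl⟩
  have hB := (pvMain aline.toList [] (by simp)).1
  rw [hps] at hB ⊢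
  simp only [pvB, List.nil_append] at hB
  simp only [hB]
  rw [(pvProc_out aline.toList).1]
  rw [PySem.Chars.join_nil_singletons]
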